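-- pv_equiv track=rewrite | github.com/bkshin01/Algorithm | Python3/프로그래머스/1/42840. 모의고사/모의고사.py | solution
-- ===== SOURCE A (Python) =====
-- def solution(answers):
--     stu1 = [1, 2, 3, 4, 5]
--     stu2 = [2, 1, 2, 3, 2, 4, 2, 5]
--     stu3 = [3, 3, 1, 1, 2, 2, 4, 4, 5, 5]
--     score = [0, 0, 0]
--     result = []
--
--     for i, ans in enumerate(answers):
--         if ans == stu1[i%len(stu1)]:
--             score[0] += 1
--         if ans == stu2[i%len(stu2)]:
--             score[1] += 1
--         if ans == stu3[i%len(stu3)]: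
--             score[2] += 1
--
--     for i, s in enumerate(score):
--         if s == max(score):
--             result.append(i + 1)
--
--     return result
-- ===== SOURCE B (Python) =====
-- def solution(answers):
--     # Histogram of (position mod 40, answer) pairs; 40 = lcm of the three
--     # pattern periods, so each student's score is a fixed 40-term sum of
--     # histogram lookups, independent of which answers were given where.
--     cnt = {}
--     for i, a in enumerate(answers):
--         k = (i % 40, a)
--         cnt[k] = cnt.get(k, 0) + 1
--     patterns = [
--         [1, 2, 3, 4, 5],
--         [2, 1, 2, 3, 2, 4, 2, 5],
--         [3, 3, 1, 1, 2, 2, 4, 4, 5, 5],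
--     ]
--     score = [sum(cnt.get((j, pat[j % len(pat)]), 0) for j in range(40))
--              for pat in patterns]
--     best = max(score)
--     return [k + 1 for k, s in enumerate(score) if s == best]
-- ===== Notes on version B (the rewrite author's own statement) =====
-- stated objective: alternative
-- what changed: B builds a dictionary histogram of (index mod 40, answer) pairs in one pass (40 = lcm of the pattern periods) and then computes each student's score as a fixed 40-term sum of histogram lookups, instead of A's per-element comparison against each cyclic pattern inside the scan.
import Mathlib
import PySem

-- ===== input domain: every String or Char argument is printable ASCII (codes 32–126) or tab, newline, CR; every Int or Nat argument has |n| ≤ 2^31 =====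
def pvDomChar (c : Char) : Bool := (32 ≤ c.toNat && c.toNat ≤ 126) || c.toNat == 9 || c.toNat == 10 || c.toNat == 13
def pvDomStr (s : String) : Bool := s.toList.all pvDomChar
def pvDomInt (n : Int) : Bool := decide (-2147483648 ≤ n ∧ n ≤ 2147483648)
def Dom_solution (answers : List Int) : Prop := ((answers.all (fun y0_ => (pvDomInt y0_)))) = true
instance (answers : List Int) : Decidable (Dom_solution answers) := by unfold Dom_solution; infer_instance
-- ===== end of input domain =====

-- B counts (index mod 40, answer) pairs into a dictionary histogram once, then scores each
-- student by 40 histogram lookups, instead of A's per-element pattern comparisons; objective: alternative.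


-- ===== PORT A =====
-- A's single interleaved loop over enumerate(answers), carrying the three-slot score state.
def solutionLoopA : List Int → Nat → Int × Int × Int → Int × Int × Int
  | [], _, s => s
  | a :: rest, i, (s1, s2, s3) =>
      solutionLoopA rest (i + 1)
        (s1 + (if a = ([1, 2, 3, 4, 5] : List Int).getD (i % 5) 0 then 1 else 0),
         s2 + (if a = ([2, 1, 2, 3, 2, 4, 2, 5] : List Int).getD (i % 8) 0 then 1 else 0),
         s3 + (if a = ([3, 3, 1, 1, 2, 2, 4, 4, 5, 5] : List Int).getD (i % 10) 0 then 1 else 0))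

def solution (answers : List Int) : List Int :=
  let (s1, s2, s3) := solutionLoopA answers 0 (0, 0, 0)
  let score : List Int := [s1, s2, s3]
  let m := max s1 (max s2 s3)   -- max(score)
  (PySem.List.enumerate score).foldl (fun result p => if p.2 = m then result ++ [p.1 + 1] else result) []

-- ===== PORT B =====
-- cnt[k] = cnt.get(k, 0) + 1 over k = (i % 40, a) for i, a in enumerate(answers)
def solutionCnt (answers : List Int) : PySem.Dict (Int × Int) Int :=
  (PySem.List.enumerate answers).foldl
    (fun d p =>
      let k := (PySem.Int.mod p.1 40, p.2)
      d.insert k (d.getD k 0 + 1))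
    PySem.Dict.empty

-- score of one pattern: sum(cnt.get((j, pat[j % len(pat)]), 0) for j in range(40))
def solutionScore (cnt : PySem.Dict (Int × Int) Int) (pat : List Int) : Int :=
  ((PySem.List.pyRange 0 40 1).map
    (fun j => cnt.getD (j, pat.getD (j.toNat % pat.length) 0) 0)).sum

def solution_alt (answers : List Int) : List Int :=
  let cnt := solutionCnt answers
  let patterns : List (List Int) :=
    [[1, 2, 3, 4, 5], [2, 1, 2, 3, 2, 4, 2, 5], [3, 3, 1, 1, 2, 2, 4, 4, 5, 5]]
  let score := patterns.map (fun pat => solutionScore cnt pat)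
  let best := score.foldl max (score.getD 0 0)   -- max(score), score a nonempty 3-list
  ((PySem.List.enumerate score).filter (fun p => p.2 == best)).map (fun p => p.1 + 1)

-- ===== PRECONDITION & SPEC =====
def Spec_solution (answers : List Int) (out : List Int) : Prop := out = solution_alt answers
instance (answers : List Int) (out : List Int) : Decidable (Spec_solution answers out) := by unfold Spec_solution; infer_instance

-- ===== CLAIM =====
def Claim_equal_solution : Prop := ∀ (answers : List Int), Dom_solution answers → Spec_solution answers (solution answers)

-- ===== LEMMAS AND PROOFS =====

-- A's interleaved loop computes, per pattern, a straight count of matches.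
def countPat (pat : List Int) : List Int → Nat → Int
  | [], _ => 0
  | a :: rest, i =>
      (if a = pat.getD (i % pat.length) 0 then 1 else 0) + countPat pat rest (i + 1)

theorem loopA_eq_counts (answers : List Int) (i : Nat) (s1 s2 s3 : Int) :
    solutionLoopA answers i (s1, s2, s3) =
      (s1 + countPat [1, 2, 3, 4, 5] answers i,
       s2 + countPat [2, 1, 2, 3, 2, 4, 2, 5] answers i,
       s3 + countPat [3, 3, 1, 1, 2, 2, 4, 4, 5, 5] answers i) := by
  induction answers generalizing i s1 s2 s3 with
  | nil => simp [solutionLoopA, countPat]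
  | cons a rest ih =>
      simp only [solutionLoopA, countPat, ih, Prod.mk.injEq]
      norm_num
      refine ⟨by ring, by ring, by ring⟩

-- the key list B's histogram is a counter of
def keyList (answers : List Int) : List (Int × Int) :=
  (PySem.List.enumerate answers).map (fun p => (PySem.Int.mod p.1 40, p.2))

theorem solutionCnt_getD (answers : List Int) (k : Int × Int) :
    (solutionCnt answers).getD k 0 = ((keyList answers).count k : Int) := by
  unfold solutionCnt keyList
  rw [← List.foldl_map (f := fun p : Int × Int => (PySem.Int.mod p.1 40, p.2))
        (g := fun d k => PySem.Dict.insert d k (d.getD k 0 + 1))]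
  rw [PySem.Dict.getD_foldl_insert_add_one]
  simp

-- summing the histogram over the 40 slots of one pattern counts the matching keys
theorem sum_count_eq_countP (v : Int → Int) (L : List (Int × Int))
    (h : ∀ p ∈ L, p.1 ∈ PySem.List.pyRange 0 40 1) :
    ((PySem.List.pyRange 0 40 1).map (fun j => (L.count (j, v j) : Int))).sum =
      (L.countP (fun p => p.2 == v p.1) : Int) := by
  induction L with
  | nil => simp
  | cons p L ih =>
      have hp := h p (by simp)
      have hL : ∀ q ∈ L, q.1 ∈ PySem.List.pyRange 0 40 1 := fun q hq => h q (by simp [hq])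
      have hcount : ∀ j : Int, ((p :: L).count (j, v j) : Int)
          = (L.count (j, v j) : Int) + (if (j, v j) = p then 1 else 0) := by
        intro j
        by_cases hje : (j, v j) = p
        · simp [hje]
        · simp [hje, Ne.symm]
      simp only [hcount]
      rw [PySem.List.sum_map_add_int, ih hL]
      have hind : ((PySem.List.pyRange 0 40 1).map
            (fun j => if (j, v j) = p then (1 : Int) else 0)).sum
          = (if p.2 == v p.1 then (1 : Int) else 0) := by
        have hb := PySem.List.sum_map_ite_one_zero
          (fun j => decide ((j, v j) = p)) (PySem.List.pyRange 0 40 1)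
        simp only [decide_eq_true_eq] at hb
        rw [hb]
        by_cases hv : p.2 = v p.1
        · have hpred : (fun j => decide ((j, v j) = p)) = (fun j => j == p.1) := by
            funext j
            by_cases hj : j = p.1
            · subst hj; simp [hv.symm]
            · simp [Prod.ext_iff, hj]
          have hone : (PySem.List.pyRange 0 40 1).countP (fun j => decide ((j, v j) = p)) = 1 := by
            rw [hpred, ← List.count]
            exact List.count_eq_one_of_mem (PySem.List.nodup_pyRange_one 0 40) hp
          simp [hv, hone]
        · have hzero : (PySem.List.pyRange 0 40 1).countP (fun j => decide ((j, v j) = p)) = 0 := by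
            rw [List.countP_eq_zero]
            intro j hj
            simp only [decide_eq_true_eq]
            intro hcon
            apply hv
            rw [← hcon]
          simp [hv, hzero]
      rw [hind]
      by_cases hv : p.2 = v p.1 <;> simp [hv]
  
-- keys of keyList all lie in range(40)
theorem keyList_fst_mem (answers : List Int) (s : Nat) :
    ∀ p ∈ (PySem.List.enumerate answers (s : Int)).map (fun p => (PySem.Int.mod p.1 40, p.2)),
      p.1 ∈ PySem.List.pyRange 0 40 1 := by
  induction answers generalizing s with
  | nil => simp [PySem.List.enumerate_nil]
  | cons a rest ih =>
      intro p hp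
      rw [PySem.List.enumerate_cons] at hp
      simp only [List.map_cons, List.mem_cons] at hp
      rcases hp with h | h
      · subst h
        rw [PySem.List.mem_pyRange_one]
        exact ⟨PySem.Int.mod_nonneg _ (by norm_num), PySem.Int.mod_lt _ (by norm_num)⟩
      · have : ((s : Int) + 1) = ((s + 1 : Nat) : Int) := by push_cast; ring
        rw [this] at h
        exact ih (s + 1) p h

-- counting matches of a pattern whose length divides 40 via the mod-40 keys
theorem countPat_eq_countP (pat : List Int) (hdvd : pat.length ∣ 40)
    (answers : List Int) (s : Nat) :
    countPat pat answers s =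
      ((PySem.List.enumerate answers (s : Int)).map (fun p => (PySem.Int.mod p.1 40, p.2))).countP
        (fun p => p.2 == pat.getD (p.1.toNat % pat.length) 0) := by
  induction answers generalizing s with
  | nil => simp [countPat, PySem.List.enumerate_nil]
  | cons a rest ih =>
      rw [PySem.List.enumerate_cons]
      simp only [List.map_cons, List.countP_cons, countPat]
      have hmod : PySem.Int.mod (s : Int) 40 = ((s % 40 : Nat) : Int) :=
        PySem.Int.mod_natCast s 40
      have hcast : ((s : Int) + 1) = ((s + 1 : Nat) : Int) := by push_cast; ring
      have hidx : (PySem.Int.mod (s : Int) 40).toNat % pat.length = s % pat.length := by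
        rw [hmod]
        simp only [Int.toNat_natCast]
        exact Nat.mod_mod_of_dvd s hdvd
      push_cast
      rw [hcast, ← ih (s + 1), hidx]
      by_cases hm : a = pat.getD (s % pat.length) 0
      · simp [hm]; ring
      · simp [add_comm]

-- one pattern's B-score equals A's count
theorem score_eq_countPat (answers : List Int) (pat : List Int)
    (hdvd : pat.length ∣ 40) :
    solutionScore (solutionCnt answers) pat = countPat pat answers 0 := by
  unfold solutionScore
  have hrw : ∀ j : Int, (solutionCnt answers).getD (j, pat.getD (j.toNat % pat.length) 0) 0
      = ((keyList answers).count (j, pat.getD (j.toNat % pat.length) 0) : Int) :=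
    fun j => solutionCnt_getD answers _
  simp only [hrw]
  rw [sum_count_eq_countP (fun j => pat.getD (j.toNat % pat.length) 0) (keyList answers)
        (keyList_fst_mem answers 0)]
  rw [countPat_eq_countP pat hdvd answers 0]
  rfl

-- ===== VERDICT =====
theorem solution_spec : Claim_equal_solution := by
  intro answers _
  show solution answers = solution_alt answers
  unfold solution solution_alt
  rw [loopA_eq_counts]
  simp only [List.map]
  rw [score_eq_countPat answers [1,2,3,4,5] (by norm_num),
      score_eq_countPat answers [2,1,2,3,2,4,2,5] (by norm_num),
      score_eq_countPat answers [3,3,1,1,2,2,4,4,5,5] (by norm_num)]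
  simp only [zero_add]
  generalize countPat [1,2,3,4,5] answers 0 = c1
  generalize countPat [2,1,2,3,2,4,2,5] answers 0 = c2
  generalize countPat [3,3,1,1,2,2,4,4,5,5] answers 0 = c3
  have hmax : ([c1, c2, c3] : List Int).foldl max (([c1, c2, c3] : List Int).getD 0 0)
      = max c1 (max c2 c3) := by
    simp [List.foldl]
  rw [hmax]
  simp only [PySem.List.enumerate_cons, PySem.List.enumerate_nil, List.filter_cons, List.filter_nil,
    List.foldl]
  generalize max c1 (max c2 c3) = m
  by_cases h1 : c1 = m <;>
    by_cases h2 : c2 = m <;>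
      by_cases h3 : c3 = m <;>
        simp [h1, h2, h3, beq_iff_eq]
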